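-- pv_equiv track=rewrite | github.com/godwon2095/python_algorithm | class_4_dynamic_algorithm/move_rock_dynamic.py | moveRocksDP
-- ===== SOURCE A (Python) =====
-- def moveRocksDP(m, n):
--     known_results = [[0]*n for i in range(m)] # m 행 n 열의 2차원 리스트(배열) 생성
--     known_results[0][0] = 'O'
--     known_results[0][1] = 'W'
--     known_results[1][0] = 'W'
--     known_results[1][1] = 'W'
--
--     for i, row in enumerate(known_results):
--         for j, item in enumerate(row):
--             if known_results[i][j] != 0:
--                 continue
--             elif i == 0:
--                 if known_results[i][j-1] == 'W':
--                     known_results[i][j] = 'L'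
--                 else:
--                     known_results[i][j] = 'W'
--             elif j == 0:
--                 if known_results[i-1][j] == 'W':
--                     known_results[i][j] = 'L'
--                 else:
--                     known_results[i][j] = 'W'
--             else:
--                 if known_results[i-1][j] == 'W' and known_results[i][j-1] == 'W' and known_results[i-1][j-1] == 'W':
--                     known_results[i][j] = 'L'
--                 else:
--                     known_results[i][j] = 'W'
--
--     return known_results
-- ===== SOURCE B (Python) =====
-- def moveRocksDP(m, n):
--     # Seed the four known cells as in the statement of the game ('O' start, its
--     # three 'W' neighbors), then fill every remaining cell directly by the parity
--     # closed form: (i, j) is 'L' exactly when i and j are both even.  No cell ever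
--     # consults a neighbor.
--     known_results = [[0] * n for _ in range(m)]
--     known_results[0][0] = 'O'
--     known_results[0][1] = 'W'
--     known_results[1][0] = 'W'
--     known_results[1][1] = 'W'
--     for i in range(m):
--         for j in range(n):
--             if i > 0 or j > 0:
--                 known_results[i][j] = 'L' if i % 2 == 0 and j % 2 == 0 else 'W'
--     return known_results
-- ===== Notes on version B (the rewrite author's own statement) =====
-- stated objective: simpler
-- what changed: Replaces the neighbor-consulting DP recurrence (each cell computed from up/left/diagonal cells with three branch cases) by an O(1) per-cell parity closed form ('L' iff both indices are even), after the same four seed-cell writes that fix the domain.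
import Mathlib
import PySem

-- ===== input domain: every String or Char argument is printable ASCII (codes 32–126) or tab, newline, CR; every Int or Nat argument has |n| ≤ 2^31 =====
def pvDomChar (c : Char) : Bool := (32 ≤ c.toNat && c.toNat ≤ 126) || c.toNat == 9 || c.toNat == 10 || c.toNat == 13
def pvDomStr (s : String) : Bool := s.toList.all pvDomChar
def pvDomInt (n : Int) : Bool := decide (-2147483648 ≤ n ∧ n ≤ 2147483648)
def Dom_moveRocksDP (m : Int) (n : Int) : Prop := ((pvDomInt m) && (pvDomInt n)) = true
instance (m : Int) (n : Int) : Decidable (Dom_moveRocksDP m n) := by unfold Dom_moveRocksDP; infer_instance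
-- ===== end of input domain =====

-- B replaces A's neighbor-consulting DP recurrence with a per-cell parity closed form
-- after the same four seed-cell writes (objective: simpler).  A mutates only its own
-- local grid, so the return value is the whole behaviour.

-- ===== PORT A =====
-- Python cells are the int 0 (unfilled) or a string; we encode a cell as Option String
-- (none = 0), so 'known_results[i][j] != 0' is '(…).isSome'.  On Pre_ every cell of the
-- returned grid is a string (some _), and '.getD ""' extracts it.
def pvGet (g : List (List (Option String))) (i j : Nat) : Option String :=
  (g.getD i []).getD j none

-- 'known_results[i][j] = v' (in-bounds on Pre_; out of bounds Python raises, excluded by Pre_)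
def pvSet (g : List (List (Option String))) (i j : Nat) (v : Option String) :
    List (List (Option String)) :=
  g.modify i (fun r => r.set j v)

-- the body of A's double 'for i, row in enumerate(...)' loop, branch for branch
def pvStep (g : List (List (Option String))) (i j : Nat) : List (List (Option String)) :=
  if (pvGet g i j).isSome then g
  else if i = 0 then
    if pvGet g i (j - 1) = some "W" then pvSet g i j (some "L") else pvSet g i j (some "W")
  else if j = 0 then
    if pvGet g (i - 1) j = some "W" then pvSet g i j (some "L") else pvSet g i j (some "W")
  else
    if pvGet g (i - 1) j = some "W" ∧ pvGet g i (j - 1) = some "W" ∧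
        pvGet g (i - 1) (j - 1) = some "W"
    then pvSet g i j (some "L") else pvSet g i j (some "W")

def moveRocksDP (m : Int) (n : Int) : List (List String) :=
  -- [[0]*n for i in range(m)]  (a negative length gives the empty list, as in Python)
  let g0 : List (List (Option String)) :=
    List.replicate m.toNat (List.replicate n.toNat (none : Option String))
  let g1 := pvSet g0 0 0 (some "O")
  let g2 := pvSet g1 0 1 (some "W")
  let g3 := pvSet g2 1 0 (some "W")
  let g4 := pvSet g3 1 1 (some "W")
  -- enumerate iterates by index over the in-place-mutated grid; row/column counts stay m, n
  let gf := (List.range m.toNat).foldl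
    (fun g i => (List.range n.toNat).foldl (fun g j => pvStep g i j) g) g4
  gf.map (fun r => r.map (fun c => c.getD ""))

-- ===== PORT B =====
-- the body of B's fill loop: the parity closed form, no neighbor reads
def pvStepB (g : List (List (Option String))) (i j : Nat) : List (List (Option String)) :=
  if 0 < i ∨ 0 < j then
    pvSet g i j (some (if i % 2 = 0 ∧ j % 2 = 0 then "L" else "W"))
  else g

def moveRocksDP_alt (m : Int) (n : Int) : List (List String) :=
  let g0 : List (List (Option String)) :=
    List.replicate m.toNat (List.replicate n.toNat (none : Option String))
  let g1 := pvSet g0 0 0 (some "O")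
  let g2 := pvSet g1 0 1 (some "W")
  let g3 := pvSet g2 1 0 (some "W")
  let g4 := pvSet g3 1 1 (some "W")
  let gf := (List.range m.toNat).foldl
    (fun g i => (List.range n.toNat).foldl (fun g j => pvStepB g i j) g) g4
  gf.map (fun r => r.map (fun c => c.getD ""))

-- ===== PRECONDITION & SPEC =====
-- A's four corner writes known_results[0][0]…[1][1] raise IndexError unless m ≥ 2 and n ≥ 2
-- (B keeps the same seed writes, hence the same domain).
def Pre_moveRocksDP (m : Int) (n : Int) : Prop := 2 ≤ m ∧ 2 ≤ n
instance (m : Int) (n : Int) : Decidable (Pre_moveRocksDP m n) := by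
  unfold Pre_moveRocksDP; infer_instance

def pvWitness_moveRocksDP : Int × Int := (2, 2)

def Spec_moveRocksDP (m : Int) (n : Int) (out : List (List String)) : Prop :=
  out = moveRocksDP_alt m n
instance (m : Int) (n : Int) (out : List (List String)) : Decidable (Spec_moveRocksDP m n out) := by
  unfold Spec_moveRocksDP; infer_instance

-- ===== CLAIM (what is proved, stated in full; the proofs are below) =====
def Claim_equal_moveRocksDP : Prop := ∀ (m : Int) (n : Int), Dom_moveRocksDP m n →
  Pre_moveRocksDP m n → Spec_moveRocksDP m n (moveRocksDP m n)

-- ===== LEMMAS AND PROOFS =====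

-- the final value of cell (i, j), as both programs produce it
def pvTarget (i j : Nat) : String :=
  if i = 0 ∧ j = 0 then "O" else if i % 2 = 0 ∧ j % 2 = 0 then "L" else "W"

-- loop invariant for both fill loops: cells strictly before (i, j) in row-major order,
-- plus the four preset corners, hold their final values; all other cells are unfilled
def pvInv (M N : Nat) (g : List (List (Option String))) (i j : Nat) : Prop :=
  g.length = M ∧ (∀ r ∈ g, r.length = N) ∧
  ∀ i' j', i' < M → j' < N →
    pvGet g i' j' =
      if (i' < i ∨ (i' = i ∧ j' < j)) ∨ (i' ≤ 1 ∧ j' ≤ 1) then some (pvTarget i' j') else none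

theorem pvGet_eq (g : List (List (Option String))) (i j : Nat) :
    pvGet g i j = (g[i]?.getD []).getD j none := by
  simp [pvGet, List.getD_eq_getElem?_getD]

theorem length_pvSet (g : List (List (Option String))) (i j : Nat) (v : Option String) :
    (pvSet g i j v).length = g.length := by
  simp [pvSet]

theorem rows_pvSet (g : List (List (Option String))) (i j : Nat) (v : Option String)
    (N : Nat) (h : ∀ r ∈ g, r.length = N) : ∀ r ∈ pvSet g i j v, r.length = N := by
  intro r hr
  rcases List.mem_iff_getElem?.1 hr with ⟨k, hk⟩
  rw [pvSet, List.getElem?_modify] at hk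
  cases hgk : g[k]? with
  | none => simp [hgk] at hk
  | some r0 =>
    have hr0 : r0.length = N := h r0 (List.mem_iff_getElem?.2 ⟨k, hgk⟩)
    simp only [hgk, Option.map_eq_map, Option.map_some] at hk
    by_cases hik : i = k <;> simp [hik] at hk <;> simp [← hk, hr0]

theorem pvGet_pvSet_self (g : List (List (Option String))) (i j : Nat) (v : Option String)
    (N : Nat) (hi : i < g.length) (hrows : ∀ r ∈ g, r.length = N) (hj : j < N) :
    pvGet (pvSet g i j v) i j = v := by
  rcases List.getElem?_eq_some_iff.2 ⟨hi, rfl⟩ with hgi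
  have hlen : g[i].length = N := hrows _ (List.getElem_mem hi)
  rw [pvGet_eq, pvSet, List.getElem?_modify, hgi]
  simp [List.getD_eq_getElem?_getD, List.getElem?_set_self (by omega : j < g[i].length)]

theorem pvGet_pvSet_ne (g : List (List (Option String))) (i j i' j' : Nat) (v : Option String)
    (h : i ≠ i' ∨ j ≠ j') : pvGet (pvSet g i j v) i' j' = pvGet g i' j' := by
  rw [pvGet_eq, pvGet_eq, pvSet, List.getElem?_modify]
  cases hgi : g[i']? with
  | none => by_cases hii : i = i' <;> simp [hii, hgi]
  | some r =>
    by_cases hii : i = i'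
    · rcases h with h | h
      · exact absurd hii h
      · simp [hii, hgi, List.getD_eq_getElem?_getD, List.getElem?_set_ne h]
    · simp [hii, hgi]

-- both programs start from the same grid: after the four seed writes the invariant holds at (0, 0)
theorem pvInit (M N : Nat) (hm : 2 ≤ M) (hn : 2 ≤ N) :
    pvInv M N
      (pvSet (pvSet (pvSet (pvSet
        (List.replicate M (List.replicate N (none : Option String)))
        0 0 (some "O")) 0 1 (some "W")) 1 0 (some "W")) 1 1 (some "W")) 0 0 := by
  set g0 : List (List (Option String)) := List.replicate M (List.replicate N none) with hg0
  have hlen0 : g0.length = M := by simp [hg0]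
  have hrows0 : ∀ r ∈ g0, r.length = N := by
    intro r hr; rw [hg0] at hr; rw [List.eq_of_mem_replicate hr]; simp
  have hget0 : ∀ i j, pvGet g0 i j = none := by
    intro i j
    rw [pvGet_eq, hg0, List.getElem?_replicate]
    by_cases h : i < M <;> simp [h, List.getD_eq_getElem?_getD, List.getElem?_replicate]
    by_cases h2 : j < N <;> simp [h2]
  have l1 := length_pvSet g0 0 0 (some "O")
  have r1 := rows_pvSet g0 0 0 (some "O") N hrows0
  set g1 := pvSet g0 0 0 (some "O") with hg1
  have l2 := length_pvSet g1 0 1 (some "W")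
  have r2 := rows_pvSet g1 0 1 (some "W") N r1
  set g2 := pvSet g1 0 1 (some "W") with hg2
  have l3 := length_pvSet g2 1 0 (some "W")
  have r3 := rows_pvSet g2 1 0 (some "W") N r2
  set g3 := pvSet g2 1 0 (some "W") with hg3
  have l4 := length_pvSet g3 1 1 (some "W")
  have r4 := rows_pvSet g3 1 1 (some "W") N r3
  refine ⟨by omega, r4, ?_⟩
  intro i' j' hi hj
  by_cases h11 : i' = 1 ∧ j' = 1
  · rw [h11.1, h11.2, pvGet_pvSet_self g3 1 1 (some "W") N (by omega) r3 (by omega)]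
    simp [pvTarget]
  · rw [pvGet_pvSet_ne g3 1 1 i' j' (some "W") (by omega)]
    by_cases h10 : i' = 1 ∧ j' = 0
    · rw [h10.1, h10.2, pvGet_pvSet_self g2 1 0 (some "W") N (by omega) r2 (by omega)]
      simp [pvTarget]
    · rw [hg3, pvGet_pvSet_ne g2 1 0 i' j' (some "W") (by omega)]
      by_cases h01 : i' = 0 ∧ j' = 1
      · rw [h01.1, h01.2, pvGet_pvSet_self g1 0 1 (some "W") N (by omega) r1 (by omega)]
        simp [pvTarget]
      · rw [hg2, pvGet_pvSet_ne g1 0 1 i' j' (some "W") (by omega)]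
        by_cases h00 : i' = 0 ∧ j' = 0
        · rw [h00.1, h00.2, pvGet_pvSet_self g0 0 0 (some "O") N (by omega) hrows0 (by omega)]
          simp [pvTarget]
        · rw [hg1, pvGet_pvSet_ne g0 0 0 i' j' (some "O") (by omega), hget0]
          rw [if_neg (by omega)]

theorem ite_LW_eq_W (p : Prop) [Decidable p] :
    ((if p then "L" else "W") = ("W" : String)) ↔ ¬ p := by
  split <;> simp_all

-- the invariant advances over an already-filled corner cell without touching the grid
theorem pvKeepInv (M N : Nat) (g : List (List (Option String))) (i j : Nat)
    (hi : i < M) (hj : j < N) (hc : i ≤ 1 ∧ j ≤ 1) (h : pvInv M N g i j) :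
    pvInv M N g i (j + 1) := by
  obtain ⟨hl, hr, hg⟩ := h
  refine ⟨hl, hr, ?_⟩
  intro i' j' hi' hj'
  rw [hg i' j' hi' hj']
  by_cases hd : i' = i ∧ j' = j
  · rw [if_pos (Or.inr (by omega)), if_pos (by omega)]
  · exact (if_congr (by omega) rfl rfl).symm

-- the invariant advances when cell (i, j) is overwritten with its final value
theorem pvWriteInv (M N : Nat) (g : List (List (Option String))) (i j : Nat)
    (hi : i < M) (hj : j < N) (h : pvInv M N g i j) :
    pvInv M N (pvSet g i j (some (pvTarget i j))) i (j + 1) := by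
  obtain ⟨hl, hr, hg⟩ := h
  have hlen : (pvSet g i j (some (pvTarget i j))).length = M := by rw [length_pvSet, hl]
  refine ⟨hlen, rows_pvSet g i j _ N hr, ?_⟩
  intro i' j' hi' hj'
  by_cases hd : i' = i ∧ j' = j
  · rw [hd.1, hd.2, pvGet_pvSet_self g i j _ N (by omega) hr hj, if_pos (by omega)]
  · rw [pvGet_pvSet_ne g i j i' j' _ (by omega), hg i' j' hi' hj']
    exact (if_congr (by omega) rfl rfl).symm

-- A's loop body advances the invariant by one cell
theorem pvStepInv (M N : Nat) (g : List (List (Option String))) (i j : Nat)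
    (hi : i < M) (hj : j < N) (h : pvInv M N g i j) :
    pvInv M N (pvStep g i j) i (j + 1) := by
  obtain ⟨hl, hr, hg⟩ := h
  by_cases hc : i ≤ 1 ∧ j ≤ 1
  · -- preset corner: the cell is already filled, the loop body skips it
    have hcell : pvGet g i j = some (pvTarget i j) := by
      rw [hg i j hi hj, if_pos (Or.inr hc)]
    have hstep : pvStep g i j = g := by rw [pvStep, hcell]; simp
    rw [hstep]
    exact pvKeepInv M N g i j hi hj hc ⟨hl, hr, hg⟩
  · -- unfilled cell: the loop body writes exactly the closed-form value
    have hcell : pvGet g i j = none := by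
      rw [hg i j hi hj, if_neg (by omega)]
    have hval : pvStep g i j = pvSet g i j (some (pvTarget i j)) := by
      rw [pvStep, hcell]
      simp only [Option.isSome_none, Bool.false_eq_true, if_false]
      by_cases hi0 : i = 0
      · -- first row, j ≥ 2: look left
        have hj2 : 2 ≤ j := by omega
        have hleft : pvGet g i (j - 1) = some (if (j-1) % 2 = 0 ∧ True then "L" else "W") := by
          rw [hg i (j - 1) hi (by omega), if_pos (Or.inl (Or.inr ⟨rfl, by omega⟩))]
          rw [pvTarget, if_neg (by omega), hi0]
          simp
        rw [if_pos hi0, hleft]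
        simp only [Option.some.injEq, ite_LW_eq_W]
        have htgt : pvTarget i j = if j % 2 = 0 then "L" else "W" := by
          rw [pvTarget, if_neg (by omega), hi0]; simp
        rw [htgt]
        by_cases hp : (j - 1) % 2 = 0
        · rw [if_neg (by simp [hp]), if_neg (by omega)]
        · rw [if_pos (by simp [hp]), if_pos (by omega)]
      · by_cases hj0 : j = 0
        · -- first column, i ≥ 2: look up
          have hi2 : 2 ≤ i := by omega
          have hup : pvGet g (i - 1) j = some (if (i-1) % 2 = 0 ∧ True then "L" else "W") := by
            rw [hg (i - 1) j (by omega) hj, if_pos (Or.inl (Or.inl (by omega)))]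
            rw [pvTarget, if_neg (by omega), hj0]
            simp
          rw [if_neg hi0, if_pos hj0, hup]
          simp only [Option.some.injEq, ite_LW_eq_W]
          have htgt : pvTarget i j = if i % 2 = 0 then "L" else "W" := by
            rw [pvTarget, if_neg (by omega), hj0]; simp
          rw [htgt]
          by_cases hp : (i - 1) % 2 = 0
          · rw [if_neg (by simp [hp]), if_neg (by omega)]
          · rw [if_pos (by simp [hp]), if_pos (by omega)]
        · -- interior: look up, left and diagonally
          have hcorner : 2 ≤ i ∨ 2 ≤ j := by omega
          have hup : pvGet g (i - 1) j =
              some (if (i-1) % 2 = 0 ∧ j % 2 = 0 then "L" else "W") := by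
            rw [hg (i - 1) j (by omega) hj, if_pos (Or.inl (Or.inl (by omega))),
              pvTarget, if_neg (by omega)]
          have hleft : pvGet g i (j - 1) =
              some (if i % 2 = 0 ∧ (j-1) % 2 = 0 then "L" else "W") := by
            rw [hg i (j - 1) hi (by omega), if_pos (Or.inl (Or.inr ⟨rfl, by omega⟩)),
              pvTarget, if_neg (by omega)]
          have hdiag : pvGet g (i - 1) (j - 1) =
              some (if (i-1) % 2 = 0 ∧ (j-1) % 2 = 0 then "L" else "W") := by
            rw [hg (i - 1) (j - 1) (by omega) (by omega), if_pos (Or.inl (Or.inl (by omega))),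
              pvTarget, if_neg (by omega)]
          rw [if_neg hi0, if_neg hj0, hup, hleft, hdiag]
          simp only [Option.some.injEq, ite_LW_eq_W]
          have htgt : pvTarget i j = if i % 2 = 0 ∧ j % 2 = 0 then "L" else "W" := by
            rw [pvTarget, if_neg (by omega)]
          rw [htgt]
          by_cases hp : i % 2 = 0 ∧ j % 2 = 0
          · rw [if_pos (by omega), if_pos hp]
          · rw [if_neg (by omega), if_neg hp]
    rw [hval]
    exact pvWriteInv M N g i j hi hj ⟨hl, hr, hg⟩

-- B's loop body advances the invariant by one cell
theorem pvStepBInv (M N : Nat) (g : List (List (Option String))) (i j : Nat)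
    (hi : i < M) (hj : j < N) (h : pvInv M N g i j) :
    pvInv M N (pvStepB g i j) i (j + 1) := by
  by_cases h0 : 0 < i ∨ 0 < j
  · have htgt : pvTarget i j = if i % 2 = 0 ∧ j % 2 = 0 then "L" else "W" := by
      rw [pvTarget, if_neg (show ¬(i = 0 ∧ j = 0) by omega)]
    have hval : pvStepB g i j = pvSet g i j (some (pvTarget i j)) := by
      rw [pvStepB, if_pos h0, htgt]
    rw [hval]
    exact pvWriteInv M N g i j hi hj h
  · have hval : pvStepB g i j = g := by rw [pvStepB, if_neg h0]
    rw [hval]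
    exact pvKeepInv M N g i j hi hj (by omega) h

-- a row-invariant-preserving loop body folded across a row
theorem pvRowFoldGen (M N i : Nat)
    (step : List (List (Option String)) → Nat → List (List (Option String)))
    (hstep : ∀ g j, j < N → pvInv M N g i j → pvInv M N (step g j) i (j + 1)) :
    ∀ (k j : Nat) (g : List (List (Option String))), j + k ≤ N → pvInv M N g i j →
      pvInv M N ((List.range' j k).foldl step g) i (j + k) := by
  intro k
  induction k with
  | zero => intro j g _ h; simpa using h
  | succ k ih =>
    intro j g hjk h
    rw [List.range'_succ, List.foldl_cons]
    have h2 := ih (j + 1) (step g j) (by omega) (hstep g j (by omega) h)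
    have : j + (k + 1) = (j + 1) + k := by omega
    rw [this]
    exact h2

-- end of row i = start of row i + 1
theorem pvRowShift (M N : Nat) (g : List (List (Option String))) (i : Nat)
    (h : pvInv M N g i N) : pvInv M N g (i + 1) 0 := by
  obtain ⟨hl, hr, hg⟩ := h
  refine ⟨hl, hr, ?_⟩
  intro i' j' hi' hj'
  rw [hg i' j' hi' hj']
  exact (if_congr (by omega) rfl rfl).symm

-- a whole-row-processing body folded down the grid
theorem pvColFoldGen (M N : Nat)
    (body : List (List (Option String)) → Nat → List (List (Option String)))
    (hbody : ∀ g i, i < M → pvInv M N g i 0 → pvInv M N (body g i) i N) :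
    ∀ (k i : Nat) (g : List (List (Option String))), i + k ≤ M → pvInv M N g i 0 →
      pvInv M N ((List.range' i k).foldl body g) (i + k) 0 := by
  intro k
  induction k with
  | zero => intro i g _ h; simpa using h
  | succ k ih =>
    intro i g hik h
    rw [List.range'_succ, List.foldl_cons]
    have h2 := ih (i + 1) _ (by omega) (pvRowShift M N _ i (hbody g i (by omega) h))
    have : i + (k + 1) = (i + 1) + k := by omega
    rw [this]
    exact h2

-- a fully processed grid maps to one determined list of strings
theorem pvFinal (M N : Nat) (g : List (List (Option String))) (h : pvInv M N g M 0) :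
    g.map (fun r => r.map (fun c => c.getD "")) =
      (List.range M).map (fun i => (List.range N).map (fun j => pvTarget i j)) := by
  obtain ⟨hl, hr, hg⟩ := h
  apply List.ext_getElem (by simp [hl])
  intro i h1 h2
  simp only [List.length_map] at h1 h2
  have hiM : i < M := by simpa using h2
  have hrowlen : g[i].length = N := hr _ (List.getElem_mem (by omega))
  simp only [List.getElem_map, List.getElem_range]
  apply List.ext_getElem (by simp [hrowlen])
  intro j h3 h4
  simp only [List.length_map] at h3 h4
  have hjN : j < N := by simpa using h4
  have hcell := hg i j hiM hjN
  rw [pvGet_eq, List.getElem?_eq_getElem (by omega : i < g.length),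
    Option.getD_some, List.getD_eq_getElem?_getD,
    List.getElem?_eq_getElem (by omega : j < g[i].length), Option.getD_some,
    if_pos (Or.inl (Or.inl hiM))] at hcell
  simp only [List.getElem_map, List.getElem_range, hcell, Option.getD_some]

-- each port's whole computation, against the same canonical grid
theorem pvRunA (M N : Nat) (hm : 2 ≤ M) (hn : 2 ≤ N) :
    (((List.range M).foldl
      (fun g i => (List.range N).foldl (fun g j => pvStep g i j) g)
      (pvSet (pvSet (pvSet (pvSet
        (List.replicate M (List.replicate N (none : Option String)))
        0 0 (some "O")) 0 1 (some "W")) 1 0 (some "W")) 1 1 (some "W"))).map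
      (fun r => r.map (fun c => c.getD ""))) =
      (List.range M).map (fun i => (List.range N).map (fun j => pvTarget i j)) := by
  apply pvFinal
  have hfold := pvColFoldGen M N
    (fun g i => (List.range N).foldl (fun g j => pvStep g i j) g)
    (fun g i hi h => by
      have := pvRowFoldGen M N i (fun g j => pvStep g i j)
        (fun g j hj h => pvStepInv M N g i j hi hj h) N 0 g (by omega) h
      rw [List.range_eq_range']
      simpa using this)
    M 0 _ (by omega) (pvInit M N hm hn)
  rw [← List.range_eq_range'] at hfold
  simpa using hfold

theorem pvRunB (M N : Nat) (hm : 2 ≤ M) (hn : 2 ≤ N) :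
    (((List.range M).foldl
      (fun g i => (List.range N).foldl (fun g j => pvStepB g i j) g)
      (pvSet (pvSet (pvSet (pvSet
        (List.replicate M (List.replicate N (none : Option String)))
        0 0 (some "O")) 0 1 (some "W")) 1 0 (some "W")) 1 1 (some "W"))).map
      (fun r => r.map (fun c => c.getD ""))) =
      (List.range M).map (fun i => (List.range N).map (fun j => pvTarget i j)) := by
  apply pvFinal
  have hfold := pvColFoldGen M N
    (fun g i => (List.range N).foldl (fun g j => pvStepB g i j) g)
    (fun g i hi h => by
      have := pvRowFoldGen M N i (fun g j => pvStepB g i j)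
        (fun g j hj h => pvStepBInv M N g i j hi hj h) N 0 g (by omega) h
      rw [List.range_eq_range']
      simpa using this)
    M 0 _ (by omega) (pvInit M N hm hn)
  rw [← List.range_eq_range'] at hfold
  simpa using hfold

-- ===== VERDICT (by name: the statement is the Claim_ definition above) =====
theorem moveRocksDP_spec : Claim_equal_moveRocksDP := by
  intro m n _ hpre
  obtain ⟨hm, hn⟩ := hpre
  have hM : 2 ≤ m.toNat := by omega
  have hN : 2 ≤ n.toNat := by omega
  unfold Spec_moveRocksDP moveRocksDP moveRocksDP_alt
  rw [pvRunA m.toNat n.toNat hM hN, pvRunB m.toNat n.toNat hM hN]
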